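-- pv_equiv track=rewrite | github.com/abbasraza125-hash/Student-Support-Concierge-Multi-Agent-AI-Platform | student_support_adk/student_support/main.py | local_route_message
-- ===== SOURCE A (Python) =====
-- def local_route_message(message: str) -> str:
--     """
--     Very simple rule-based router used as fallback when ADK route is missing or ambiguous.
--     Returns agent name string.
--     """
--     m = (message or "").lower()
--     if any(tok in m for tok in ("orientation", "how can i start", "how to start", "get started", "enroll", "onboard")):
--         return "OrientationAgent"
--     if any(tok in m for tok in ("access code", "access codes", "accesscode", "i need code", "code", "password", "login", "log in","can't log","cant log","lockdown")):
--         return "TechSupportAgent"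
--     if any(tok in m for tok in ("progress", "where am i", "percent", "completion", "completed", "grade")):
--         return "ProgressAgent"
--     if any(tok in m for tok in ("refund", "refund policy", "class time", "timings", "schedule", "fees", "certificate", "how long", "duration")):
--         return "FAQAgent"
--     if any(tok in m for tok in ("traceback", "exception", "crash", "error", "server")):
--         # return the canonical ErrorAgent name
--         return "ErrorAgent"
--     # default fallback
--     return "FAQAgent"
-- ===== SOURCE B (Python) =====
-- # Two-stage router: first collect ALL agents whose keywords appear anywhere
-- # in the message (one pass over a flat token->agent table), then pick the
-- # highest-priority one; default FAQAgent when nothing matched.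
-- TOKEN_AGENT = [
--     ("orientation", "OrientationAgent"), ("how can i start", "OrientationAgent"),
--     ("how to start", "OrientationAgent"), ("get started", "OrientationAgent"),
--     ("enroll", "OrientationAgent"), ("onboard", "OrientationAgent"),
--     ("access code", "TechSupportAgent"), ("access codes", "TechSupportAgent"),
--     ("accesscode", "TechSupportAgent"), ("i need code", "TechSupportAgent"),
--     ("code", "TechSupportAgent"), ("password", "TechSupportAgent"),
--     ("login", "TechSupportAgent"), ("log in", "TechSupportAgent"),
--     ("can't log", "TechSupportAgent"), ("cant log", "TechSupportAgent"),
--     ("lockdown", "TechSupportAgent"),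
--     ("progress", "ProgressAgent"), ("where am i", "ProgressAgent"),
--     ("percent", "ProgressAgent"), ("completion", "ProgressAgent"),
--     ("completed", "ProgressAgent"), ("grade", "ProgressAgent"),
--     ("refund", "FAQAgent"), ("refund policy", "FAQAgent"),
--     ("class time", "FAQAgent"), ("timings", "FAQAgent"),
--     ("schedule", "FAQAgent"), ("fees", "FAQAgent"),
--     ("certificate", "FAQAgent"), ("how long", "FAQAgent"),
--     ("duration", "FAQAgent"),
--     ("traceback", "ErrorAgent"), ("exception", "ErrorAgent"),
--     ("crash", "ErrorAgent"), ("error", "ErrorAgent"), ("server", "ErrorAgent"),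
-- ]
--
-- PRIORITY = {"OrientationAgent": 0, "TechSupportAgent": 1, "ProgressAgent": 2,
--             "FAQAgent": 3, "ErrorAgent": 4}
--
-- def local_route_message(message: str) -> str:
--     m = (message or "").lower()
--     hits = {agent for tok, agent in TOKEN_AGENT if tok in m}
--     if not hits:
--         return "FAQAgent"
--     return min(hits, key=PRIORITY.__getitem__)
-- ===== Notes on version B (the rewrite author's own statement) =====
-- stated objective: alternative
-- what changed: B replaces A's ordered short-circuit branch chain with a two-stage algorithm: one pass over a flat token-to-agent table collects the set of all matched agents, then the winner is selected afterwards as the min of that set under an explicit priority dict (default FAQAgent when the set is empty).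
import Mathlib
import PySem

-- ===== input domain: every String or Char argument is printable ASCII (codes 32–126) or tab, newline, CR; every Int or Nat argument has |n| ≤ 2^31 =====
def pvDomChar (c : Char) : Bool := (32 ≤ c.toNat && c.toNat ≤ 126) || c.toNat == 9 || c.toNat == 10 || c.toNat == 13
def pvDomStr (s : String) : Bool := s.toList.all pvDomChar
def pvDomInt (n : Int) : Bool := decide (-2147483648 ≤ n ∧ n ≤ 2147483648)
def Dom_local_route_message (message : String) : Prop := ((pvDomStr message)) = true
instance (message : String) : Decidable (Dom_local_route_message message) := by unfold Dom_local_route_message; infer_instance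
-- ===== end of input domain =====

-- B replaces A's ordered branch chain by a two-stage algorithm: collect the set of
-- ALL matched agents over a flat token->agent table, then pick the min-priority one.

-- ===== PORT A =====
def local_route_message (message : String) : String :=
  let m := PySem.Str.lower message
  if ["orientation", "how can i start", "how to start", "get started", "enroll", "onboard"].any
      (fun tok => PySem.Str.isIn tok m) then "OrientationAgent"
  else if ["access code", "access codes", "accesscode", "i need code", "code", "password", "login",
      "log in", "can't log", "cant log", "lockdown"].any (fun tok => PySem.Str.isIn tok m) then "TechSupportAgent"
  else if ["progress", "where am i", "percent", "completion", "completed", "grade"].any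
      (fun tok => PySem.Str.isIn tok m) then "ProgressAgent"
  else if ["refund", "refund policy", "class time", "timings", "schedule", "fees", "certificate",
      "how long", "duration"].any (fun tok => PySem.Str.isIn tok m) then "FAQAgent"
  else if ["traceback", "exception", "crash", "error", "server"].any
      (fun tok => PySem.Str.isIn tok m) then "ErrorAgent"
  else "FAQAgent"

-- ===== PORT B =====
-- TOKEN_AGENT: the flat token->agent table of Source B
def pvTokenAgent : List (String × String) :=
  [ ("orientation", "OrientationAgent"), ("how can i start", "OrientationAgent"),
    ("how to start", "OrientationAgent"), ("get started", "OrientationAgent"),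
    ("enroll", "OrientationAgent"), ("onboard", "OrientationAgent"),
    ("access code", "TechSupportAgent"), ("access codes", "TechSupportAgent"),
    ("accesscode", "TechSupportAgent"), ("i need code", "TechSupportAgent"),
    ("code", "TechSupportAgent"), ("password", "TechSupportAgent"),
    ("login", "TechSupportAgent"), ("log in", "TechSupportAgent"),
    ("can't log", "TechSupportAgent"), ("cant log", "TechSupportAgent"),
    ("lockdown", "TechSupportAgent"),
    ("progress", "ProgressAgent"), ("where am i", "ProgressAgent"),
    ("percent", "ProgressAgent"), ("completion", "ProgressAgent"),
    ("completed", "ProgressAgent"), ("grade", "ProgressAgent"),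
    ("refund", "FAQAgent"), ("refund policy", "FAQAgent"),
    ("class time", "FAQAgent"), ("timings", "FAQAgent"),
    ("schedule", "FAQAgent"), ("fees", "FAQAgent"),
    ("certificate", "FAQAgent"), ("how long", "FAQAgent"),
    ("duration", "FAQAgent"),
    ("traceback", "ErrorAgent"), ("exception", "ErrorAgent"),
    ("crash", "ErrorAgent"), ("error", "ErrorAgent"), ("server", "ErrorAgent") ]

-- PRIORITY dict of Source B (keys cover every agent name occurring in pvTokenAgent)
def pvPriority : PySem.Dict String Int :=
  PySem.Dict.ofList
    [("OrientationAgent", 0), ("TechSupportAgent", 1), ("ProgressAgent", 2),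
     ("FAQAgent", 3), ("ErrorAgent", 4)]

def local_route_message_alt (message : String) : String :=
  let m := PySem.Str.lower message
  -- hits = {agent for tok, agent in TOKEN_AGENT if tok in m}  (set comprehension = fold of Set.add)
  let hits : PySem.Set String :=
    pvTokenAgent.foldl
      (fun s p => if PySem.Str.isIn p.1 m then PySem.Set.add s p.2 else s) PySem.Set.empty
  -- min(hits, key=PRIORITY.__getitem__) if hits else "FAQAgent"; PRIORITY keys are total on hits
  match PySem.List.min? hits (fun a => PySem.Dict.getD pvPriority a 0) with
  | some a => a
  | none => "FAQAgent"

-- ===== PRECONDITION & SPEC =====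
def Spec_local_route_message (message : String) (out : String) : Prop := out = local_route_message_alt message
instance (message : String) (out : String) : Decidable (Spec_local_route_message message out) := by unfold Spec_local_route_message; infer_instance

-- ===== CLAIM (what is proved, stated in full; the proofs are below) =====
def Claim_equal_local_route_message : Prop := ∀ (message : String), Dom_local_route_message message → Spec_local_route_message message (local_route_message message)

-- ===== LEMMAS AND PROOFS =====

theorem pv_add_idem (s : PySem.Set String) (a : String) :
    PySem.Set.add (PySem.Set.add s a) a = PySem.Set.add s a := by
  simp [PySem.Set.add, PySem.Set.contains]
  split_ifs <;> simp_all

-- folding a token group that all maps to the same agent = one conditional add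
theorem pv_group_fold (toks : List String) (a m : String) (s : PySem.Set String) :
    ((toks.map (fun t => (t, a))).foldl
      (fun s p => if PySem.Str.isIn p.1 m then PySem.Set.add s p.2 else s) s)
    = if toks.any (fun t => PySem.Str.isIn t m) then PySem.Set.add s a else s := by
  induction toks generalizing s with
  | nil => simp
  | cons t ts ih =>
    simp only [List.map_cons, List.foldl_cons, List.any_cons]
    rw [ih]
    by_cases h : PySem.Str.isIn t m = true
    · rw [if_pos h, if_pos (show (PySem.Str.isIn t m || ts.any fun t => PySem.Str.isIn t m) = true by rw [Bool.or_eq_true]; exact Or.inl h)]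
      by_cases hA : (ts.any fun t => PySem.Str.isIn t m) = true
      · rw [if_pos hA, pv_add_idem]
      · rw [if_neg hA]
    · rw [if_neg h]
      by_cases hA : (ts.any fun t => PySem.Str.isIn t m) = true
      · rw [if_pos hA, if_pos (show (PySem.Str.isIn t m || ts.any fun t => PySem.Str.isIn t m) = true by rw [Bool.or_eq_true]; exact Or.inr hA)]
      · rw [if_neg hA, if_neg (show ¬(PySem.Str.isIn t m || ts.any fun t => PySem.Str.isIn t m) = true by
          rw [Bool.or_eq_true]; rintro (hc | hc); exacts [h hc, hA hc])]

-- ===== VERDICT (by name: the statement is the Claim_ definition above) =====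
theorem local_route_message_spec : Claim_equal_local_route_message := by
  intro message _
  unfold Spec_local_route_message local_route_message local_route_message_alt
  have htab : pvTokenAgent =
      (["orientation", "how can i start", "how to start", "get started", "enroll", "onboard"].map
        (fun t => (t, "OrientationAgent")))
      ++ (["access code", "access codes", "accesscode", "i need code", "code", "password", "login",
          "log in", "can't log", "cant log", "lockdown"].map (fun t => (t, "TechSupportAgent")))
      ++ (["progress", "where am i", "percent", "completion", "completed", "grade"].map
          (fun t => (t, "ProgressAgent")))
      ++ (["refund", "refund policy", "class time", "timings", "schedule", "fees", "certificate",
          "how long", "duration"].map (fun t => (t, "FAQAgent")))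
      ++ (["traceback", "exception", "crash", "error", "server"].map
          (fun t => (t, "ErrorAgent"))) := rfl
  simp only [htab, List.foldl_append, pv_group_fold]
  set m := PySem.Str.lower message
  cases h1 : ["orientation", "how can i start", "how to start", "get started", "enroll", "onboard"].any
      (fun tok => PySem.Str.isIn tok m) <;>
    cases h2 : ["access code", "access codes", "accesscode", "i need code", "code", "password", "login",
      "log in", "can't log", "cant log", "lockdown"].any (fun tok => PySem.Str.isIn tok m) <;>
    cases h3 : ["progress", "where am i", "percent", "completion", "completed", "grade"].any
      (fun tok => PySem.Str.isIn tok m) <;>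
    cases h4 : ["refund", "refund policy", "class time", "timings", "schedule", "fees", "certificate",
      "how long", "duration"].any (fun tok => PySem.Str.isIn tok m) <;>
    cases h5 : ["traceback", "exception", "crash", "error", "server"].any
      (fun tok => PySem.Str.isIn tok m) <;>
    simp [h1, h2, h3, h4, h5] <;> decide
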